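-- pv_equiv track=rewrite | github.com/t0r1n88/Lachesis | career_guidance/andreeva_pup.py | processing_result_pup
-- ===== SOURCE A (Python) =====
-- def processing_result_pup(row):
--     """
-- Функция для вычисления итогового балла
-- """
--
--     # Создаем словарь для хранения данных
--     dct_type = {'Уверенность в будущем выборе': 0, 'Нерешительность в выборе профессии': 0}
--     lst_confidence = [1, 2, 4, 5, 7, 8, 9, 12, 13, 15, 17, 18, 19, 20, 22, 23]
--     lst_indecision = [0, 3, 6, 10, 11, 14, 16, 21]
--     for idx, value in enumerate(row):
--         if idx in lst_confidence:
--             dct_type['Уверенность в будущем выборе'] += value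
--         else:
--             dct_type['Нерешительность в выборе профессии'] += value
--
--     begin_str = (f'\nУверенность в будущем выборе: {dct_type["Уверенность в будущем выборе"]}; \n'
--                  f'Нерешительность в выборе профессии: {dct_type["Нерешительность в выборе профессии"]}')
--     return begin_str
-- ===== SOURCE B (Python) =====
-- def processing_result_pup(row):
--     """Staged: confidence score gathers row[i] directly at the 16 fixed slots;
--     indecision = sum(row) - confidence. No enumerate pass, no per-element branch."""
--     lst_confidence = [1, 2, 4, 5, 7, 8, 9, 12, 13, 15, 17, 18, 19, 20, 22, 23]
--     n = len(row)
--     conf = sum(row[i] for i in lst_confidence if i < n)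
--     total = sum(row)
--     return (f'\nУверенность в будущем выборе: {conf}; \n'
--             f'Нерешительность в выборе профессии: {total - conf}')
-- ===== Notes on version B (the rewrite author's own statement) =====
-- stated objective: faster
-- what changed: Instead of enumerating the row and branching each element by membership in the index list, B gathers the confidence score by direct indexing at the 16 fixed confidence slots (bounded by len(row)) and takes one plain sum(row) for the total; indecision = total - confidence.
import Mathlib
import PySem

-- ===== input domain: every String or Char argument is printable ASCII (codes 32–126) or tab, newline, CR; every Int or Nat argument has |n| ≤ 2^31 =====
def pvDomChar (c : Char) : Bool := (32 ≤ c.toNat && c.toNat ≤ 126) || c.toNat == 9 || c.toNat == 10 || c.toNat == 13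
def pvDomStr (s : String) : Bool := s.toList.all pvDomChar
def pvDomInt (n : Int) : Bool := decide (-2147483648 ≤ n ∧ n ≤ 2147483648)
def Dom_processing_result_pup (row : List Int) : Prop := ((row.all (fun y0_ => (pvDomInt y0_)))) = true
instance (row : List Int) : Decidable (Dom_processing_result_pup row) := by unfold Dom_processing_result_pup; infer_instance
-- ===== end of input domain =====

-- B gathers the confidence score by direct indexing at the 16 fixed slots plus one plain sum for the total (indecision = total - confidence); no enumerate pass, no per-element branch.

-- ===== PORT A =====
def pvK1 : String := "Уверенность в будущем выборе"
def pvK2 : String := "Нерешительность в выборе профессии"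
def pvLstConfidence : List Int := [1, 2, 4, 5, 7, 8, 9, 12, 13, 15, 17, 18, 19, 20, 22, 23]

def processing_result_pup (row : List Int) : String :=
  let dct_type : PySem.Dict String Int :=
    ((PySem.Dict.empty).insert pvK1 0).insert pvK2 0
  let dct_type :=
    (PySem.List.enumerate row 0).foldl (fun d p =>
      if pvLstConfidence.contains p.1 then
        d.modify pvK1 0 (· + p.2)
      else
        d.modify pvK2 0 (· + p.2)) dct_type
  "\nУверенность в будущем выборе: " ++ PySem.Int.toStr (dct_type.getD pvK1 0) ++ "; \n" ++
    "Нерешительность в выборе профессии: " ++ PySem.Int.toStr (dct_type.getD pvK2 0)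

-- ===== PORT B =====
def pvLstConfidenceB : List Int := [1, 2, 4, 5, 7, 8, 9, 12, 13, 15, 17, 18, 19, 20, 22, 23]

def processing_result_pup_alt (row : List Int) : String :=
  let n : Int := row.length
  -- conf = sum(row[i] for i in lst_confidence if i < n); each access is in range, so getD 0 is never the default
  let conf := pvLstConfidenceB.foldl
    (fun s i => if i < n then s + ((PySem.List.pyGet? row i).getD 0) else s) 0
  let total := row.foldl (· + ·) 0
  "\nУверенность в будущем выборе: " ++ PySem.Int.toStr conf ++ "; \n" ++
    "Нерешительность в выборе профессии: " ++ PySem.Int.toStr (total - conf)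

-- ===== PRECONDITION & SPEC =====
def Spec_processing_result_pup (row : List Int) (out : String) : Prop := out = processing_result_pup_alt row
instance (row : List Int) (out : String) : Decidable (Spec_processing_result_pup row out) := by unfold Spec_processing_result_pup; infer_instance

-- ===== CLAIM (what is proved, stated in full; the proofs are below) =====
def Claim_equal_processing_result_pup : Prop := ∀ (row : List Int), Dom_processing_result_pup row → Spec_processing_result_pup row (processing_result_pup row)

-- ===== LEMMAS AND PROOFS =====

-- sums over A's enumerated pairs
def pvConfSum : List (Int × Int) → Int
  | [] => 0
  | p :: l => (if pvLstConfidence.contains p.1 then p.2 else 0) + pvConfSum l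

def pvTotSum : List (Int × Int) → Int
  | [] => 0
  | p :: l => p.2 + pvTotSum l

-- B's per-index gathered value and its sum over an index list
def pvG (row : List Int) (i : Int) : Int :=
  if i < (row.length : Int) then ((PySem.List.pyGet? row i).getD 0) else 0

def pvCSum (C : List Int) (row : List Int) : Int :=
  match C with
  | [] => 0
  | i :: C => pvG row i + pvCSum C row

lemma pvK1_ne_K2 : pvK1 ≠ pvK2 := by decide

lemma loopA_K1 (l : List (Int × Int)) (d : PySem.Dict String Int) :
    (l.foldl (fun d p =>
      if pvLstConfidence.contains p.1 then d.modify pvK1 0 (· + p.2)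
      else d.modify pvK2 0 (· + p.2)) d).getD pvK1 0 = d.getD pvK1 0 + pvConfSum l := by
  induction l generalizing d with
  | nil => simp [pvConfSum]
  | cons p l ih =>
    simp only [List.foldl_cons, pvConfSum]
    split_ifs with h
    · rw [ih, PySem.Dict.getD_modify_self]; ring
    · rw [ih, PySem.Dict.getD_modify_of_ne _ _ _ pvK1_ne_K2]; ring

lemma loopA_K2 (l : List (Int × Int)) (d : PySem.Dict String Int) :
    (l.foldl (fun d p =>
      if pvLstConfidence.contains p.1 then d.modify pvK1 0 (· + p.2)
      else d.modify pvK2 0 (· + p.2)) d).getD pvK2 0 = d.getD pvK2 0 + (pvTotSum l - pvConfSum l) := by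
  induction l generalizing d with
  | nil => simp [pvConfSum, pvTotSum]
  | cons p l ih =>
    simp only [List.foldl_cons, pvConfSum, pvTotSum]
    split_ifs with h
    · rw [ih, PySem.Dict.getD_modify_of_ne _ _ _ pvK1_ne_K2.symm]; ring
    · rw [ih, PySem.Dict.getD_modify_self]; ring

lemma pvConfSum_append (l1 l2 : List (Int × Int)) :
    pvConfSum (l1 ++ l2) = pvConfSum l1 + pvConfSum l2 := by
  induction l1 with
  | nil => simp [pvConfSum]
  | cons p l ih => simp only [List.cons_append, pvConfSum, ih]; ring

lemma pvTotSum_eq (row : List Int) (k : Int) :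
    pvTotSum (PySem.List.enumerate row k) = row.foldl (· + ·) 0 := by
  have h : ∀ (row : List Int) (k : Int), pvTotSum (PySem.List.enumerate row k) = row.sum := by
    intro row
    induction row with
    | nil => intro k; simp [PySem.List.enumerate_nil, pvTotSum]
    | cons x xs ih => intro k; simp [PySem.List.enumerate_cons, pvTotSum, ih]
  rw [h, List.sum_eq_foldl]

lemma pvG_append (row : List Int) (v : Int) (i : Int) (hi : 0 ≤ i) :
    pvG (row ++ [v]) i = pvG row i + (if i = (row.length : Int) then v else 0) := by
  unfold pvG
  obtain ⟨m, rfl⟩ : ∃ m : ℕ, i = (m : Int) := ⟨i.toNat, (Int.toNat_of_nonneg hi).symm⟩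
  rw [PySem.List.pyGet?_natCast, PySem.List.pyGet?_natCast]
  simp only [List.length_append, List.length_cons, List.length_nil]
  rcases lt_trichotomy m row.length with h | h | h
  · rw [List.getElem?_append_left h]
    rw [if_pos (by omega : (m : Int) < ((row.length : Nat) : Int)),
        if_pos (by push_cast; omega), if_neg (by omega : ¬ ((m : Int) = ((row.length : Nat) : Int)))]
    ring
  · rw [show (row ++ [v])[m]? = some v from by rw [h]; exact List.getElem?_concat_length]
    rw [if_pos (by push_cast; omega), if_neg (by omega : ¬ ((m : Int) < ((row.length : Nat) : Int))),
        if_pos (by omega : ((m : Int) = ((row.length : Nat) : Int)))]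
    simp
  · rw [if_neg (by push_cast; omega), if_neg (by omega : ¬ ((m : Int) < ((row.length : Nat) : Int))),
        if_neg (by omega : ¬ ((m : Int) = ((row.length : Nat) : Int)))]
    ring

lemma pvCSum_append (C : List Int) (row : List Int) (v : Int) (hC : ∀ i ∈ C, 0 ≤ i) :
    pvCSum C (row ++ [v]) = pvCSum C row + (C.count ((row.length : Int))) * v := by
  induction C with
  | nil => simp [pvCSum]
  | cons i C ih =>
    simp only [pvCSum]
    rw [pvG_append _ _ _ (hC i (by simp)), ih (fun j hj => hC j (by simp [hj]))]
    rw [List.count_cons]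
    by_cases h : i = (row.length : Int)
    · simp only [h, beq_self_eq_true, if_true]
      push_cast; ring
    · have hb : (i == (row.length : Int)) = false := beq_eq_false_iff_ne.mpr h
      have hg : (if i = (row.length : Int) then v else 0) = 0 := if_neg h
      simp only [hb, Bool.false_eq_true, if_false, hg]
      ring

lemma pvNodupC : pvLstConfidence.Nodup := by decide

lemma count_mul (n v : Int) :
    ((pvLstConfidence.count n : Nat) : Int) * v
      = if pvLstConfidence.contains n then v else 0 := by
  by_cases h : n ∈ pvLstConfidence
  · rw [List.count_eq_one_of_mem pvNodupC h, if_pos ((List.contains_iff_mem).mpr h)]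
    simp
  · rw [List.count_eq_zero.mpr h,
        if_neg (fun hc => h ((List.contains_iff_mem).mp hc))]
    simp

lemma conf_eq (row : List Int) :
    pvConfSum (PySem.List.enumerate row 0) = pvCSum pvLstConfidence row := by
  induction row using List.reverseRecOn with
  | nil => simp [PySem.List.enumerate_nil, pvConfSum]; decide
  | append_singleton xs v ih =>
    rw [PySem.List.enumerate_append, pvConfSum_append, ih]
    rw [pvCSum_append _ _ _ (by decide)]
    simp only [PySem.List.enumerate_cons, PySem.List.enumerate_nil, pvConfSum]
    rw [count_mul]
    simp

lemma foldB (C : List Int) (row : List Int) (s : Int) :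
    C.foldl (fun s i => if i < (row.length : Int) then s + ((PySem.List.pyGet? row i).getD 0) else s) s
      = s + pvCSum C row := by
  induction C generalizing s with
  | nil => simp [pvCSum]
  | cons i C ih =>
    simp only [List.foldl_cons, pvCSum]
    split_ifs with h
    · rw [ih]; unfold pvG; rw [if_pos h]; ring
    · rw [ih]; unfold pvG; rw [if_neg h]; ring

lemma pvC_eq : pvLstConfidenceB = pvLstConfidence := rfl

-- ===== VERDICT (by name: the statement is the Claim_ definition above) =====
theorem processing_result_pup_spec : Claim_equal_processing_result_pup := by
  intro row _
  unfold Spec_processing_result_pup processing_result_pup processing_result_pup_alt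
  simp only [pvC_eq, foldB, loopA_K1, loopA_K2, pvTotSum_eq, conf_eq]
  have h1 : (((PySem.Dict.empty : PySem.Dict String Int).insert pvK1 0).insert pvK2 0).getD pvK1 0 = 0 := by decide
  have h2 : (((PySem.Dict.empty : PySem.Dict String Int).insert pvK1 0).insert pvK2 0).getD pvK2 0 = 0 := by decide
  rw [h1, h2]
  ring
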